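-- pv_equiv track=rewrite | github.com/open-compass/opencompass | opencompass/datasets/cibench.py | valid_step
-- ===== SOURCE A (Python) =====
-- def valid_step(step):
--     """Whether the step is executable and valid."""
--     # Found the latest code interpreter to determine valid
--     for action in step[::-1]:
--         if action['type'] == 'IPythonInterpreter':
--             if action['errmsg']:
--                 return True, False
--             else:
--                 return True, True
--     # No code interpreter for this step, reckon as False
--     return False, False
-- ===== SOURCE B (Python) =====
-- def valid_step(step):
--     """Whether the step is executable and valid."""
--     # Recursive decomposition: decide on the final action, else recurse on the rest.
--     if not step:
--         return False, False
--     action = step[-1]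
--     if action['type'] == 'IPythonInterpreter':
--         return True, not action['errmsg']
--     return valid_step(step[:-1])
-- ===== Notes on version B (the rewrite author's own statement) =====
-- stated objective: alternative
-- what changed: replaces A's iterative loop over the reversed slice by structural recursion that inspects the final action and recurses on the rest, merging A's two-branch return into one boolean expression
import Mathlib
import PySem

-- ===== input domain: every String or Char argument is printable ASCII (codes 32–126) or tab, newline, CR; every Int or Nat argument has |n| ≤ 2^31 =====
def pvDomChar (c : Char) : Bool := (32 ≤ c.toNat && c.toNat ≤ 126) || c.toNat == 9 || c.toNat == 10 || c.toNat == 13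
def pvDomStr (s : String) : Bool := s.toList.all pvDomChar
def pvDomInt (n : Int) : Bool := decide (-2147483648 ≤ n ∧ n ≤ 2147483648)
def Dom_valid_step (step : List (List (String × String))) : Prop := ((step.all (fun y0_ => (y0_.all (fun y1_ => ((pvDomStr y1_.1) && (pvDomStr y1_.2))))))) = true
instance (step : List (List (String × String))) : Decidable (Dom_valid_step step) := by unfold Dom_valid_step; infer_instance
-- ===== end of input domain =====

-- B replaces A's iterative loop over the reversed slice by structural recursion peeling the
-- final action, with A's two-branch return merged into one boolean (objective: alternative
-- decomposition).

-- dict access a[k] modelled with default "" for a missing key; exact wherever the key is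
-- present (absence where the scan reaches it is excluded by Pre_valid_step: Python raises
-- KeyError there, in both A and B)
def vsGet (a : List (String × String)) (k : String) : String :=
  ((a.find? (fun q => q.1 == k)).map (·.2)).getD ""

def vsHasKey (a : List (String × String)) (k : String) : Bool :=
  (a.find? (fun q => q.1 == k)).isSome

-- ===== PORT A =====
-- the loop: for action in step[::-1]: …
def vsGo (l : List (List (String × String))) : Bool × Bool :=
  match l with
  | [] => (false, false)
  | a :: rest =>
    if vsGet a "type" == "IPythonInterpreter" then
      if vsGet a "errmsg" ≠ "" then (true, false) else (true, true)
    else vsGo rest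

def valid_step (step : List (List (String × String))) : Bool × Bool :=
  vsGo step.reverse   -- step[::-1] is List.reverse

-- ===== PORT B =====
-- Source B's recursion: empty → (False, False); else inspect step[-1] (= getLast of a nonempty
-- list), and recurse on step[:-1] (= dropLast)
def valid_step_alt (step : List (List (String × String))) : Bool × Bool :=
  match h : step.getLast? with
  | none => (false, false)
  | some action =>
    if vsGet action "type" == "IPythonInterpreter" then
      (true, vsGet action "errmsg" == "")
    else valid_step_alt step.dropLast
termination_by step.length
decreasing_by
  have hne : step ≠ [] := by intro e; subst e; simp at h
  have := List.length_pos_iff.mpr hne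
  simp [List.length_dropLast]; omega

-- ===== PRECONDITION & SPEC =====
-- Pre_ excludes exactly the inputs on which Python (A and B alike) raises KeyError: an action
-- without a 'type' key reached by the scan before the last interpreter action, or that
-- interpreter action itself lacking an 'errmsg' key.
def Pre_valid_step (step : List (List (String × String))) : Prop :=
  ((step.reverse.takeWhile (fun a => !(vsGet a "type" == "IPythonInterpreter"))).all
      (fun a => vsHasKey a "type")) = true ∧
  ((step.reverse.dropWhile (fun a => !(vsGet a "type" == "IPythonInterpreter"))).head?.all
      (fun a => vsHasKey a "errmsg")) = true
instance (step : List (List (String × String))) : Decidable (Pre_valid_step step) := by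
  unfold Pre_valid_step; infer_instance

def pvWitness_valid_step : (List (List (String × String))) :=
  [[("type", "IPythonInterpreter"), ("errmsg", "")], [("type", "x"), ("k", "v")]]

def Spec_valid_step (step : List (List (String × String))) (out : Bool × Bool) : Prop := out = valid_step_alt step
instance (step : List (List (String × String))) (out : Bool × Bool) : Decidable (Spec_valid_step step out) := by unfold Spec_valid_step; infer_instance

-- ===== CLAIM (what is proved, stated in full; the proofs are below) =====
def Claim_equal_valid_step : Prop := ∀ (step : List (List (String × String))), Dom_valid_step step → Pre_valid_step step → Spec_valid_step step (valid_step step)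

-- ===== LEMMAS AND PROOFS =====
-- B's last-element recursion computes exactly A's scan of the reversed list
theorem alt_eq_go_reverse (l : List (List (String × String))) :
    valid_step_alt l = vsGo l.reverse := by
  induction l using List.reverseRecOn with
  | nil => simp [valid_step_alt, vsGo]
  | append_singleton l a ih =>
    have hg : (l ++ [a]).getLast? = some a := by simp
    rw [valid_step_alt]
    split
    · next h => rw [hg] at h; cases h
    · next action h =>
      rw [hg] at h; injection h with h; subst h
      rw [List.dropLast_concat, ih]
      have hr : (l ++ [a]).reverse = a :: l.reverse := by simp
      rw [hr]
      simp only [vsGo]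
      cases hp : (vsGet a "type" == "IPythonInterpreter") with
      | false => simp
      | true => by_cases he : vsGet a "errmsg" = "" <;> simp [he]

-- ===== VERDICT (by name: the statement is the Claim_ definition above) =====
theorem valid_step_spec : Claim_equal_valid_step := by
  intro step _ _
  show valid_step step = valid_step_alt step
  rw [alt_eq_go_reverse]; rfl
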